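-- pv_equiv track=rewrite | github.com/LocTr/deutsch_flashcard_formatter | update_plurals.py | create_colored_plural
-- ===== SOURCE A (Python) =====
-- def create_colored_plural(plural_word, changed_parts):
--     """Create a plural word with only the changed parts colored in orange"""
--     if not changed_parts:
--         return plural_word
--
--     # Build the result by iterating through the plural word
--     result = ""
--     i = 0
--     while i < len(plural_word):
--         # Check if current position starts with any changed part
--         found_change = False
--         for changed in changed_parts:
--             if plural_word[i:i+len(changed)] == changed:
--                 # Color this part in orange
--                 result += '<span style=""color: rgb(255, 140, 0);"">' + changed + '</span>'
--                 i += len(changed)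
--                 found_change = True
--                 break
--
--         if not found_change:
--             result += plural_word[i]
--             i += 1
--
--     return result
-- ===== SOURCE B (Python) =====
-- def create_colored_plural(plural_word, changed_parts):
--     """Create a plural word with only the changed parts colored in orange"""
--     out = []
--     pos = 0
--     n = len(plural_word)
--     while pos < n:
--         # next match: smallest index >= pos, ties broken by list order
--         best = None
--         for part in changed_parts:
--             j = plural_word.find(part, pos)
--             if j != -1 and (best is None or j < best[0]):
--                 best = (j, part)
--         if best is None:
--             out.append(plural_word[pos:])
--             break
--         j, part = best
--         out.append(plural_word[pos:j])
--         out.append('<span style=""color: rgb(255, 140, 0);"">' + part + '</span>')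
--         pos = j + len(part)
--     return "".join(out)
-- ===== Notes on version B (the rewrite author's own statement) =====
-- stated objective: alternative
-- what changed: Instead of stepping one character at a time and testing every changed part at each position, B repeatedly jumps with str.find to the next match position (smallest index, ties by list order), copies the unmatched chunk in one slice, and joins the pieces at the end.
import Mathlib
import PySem

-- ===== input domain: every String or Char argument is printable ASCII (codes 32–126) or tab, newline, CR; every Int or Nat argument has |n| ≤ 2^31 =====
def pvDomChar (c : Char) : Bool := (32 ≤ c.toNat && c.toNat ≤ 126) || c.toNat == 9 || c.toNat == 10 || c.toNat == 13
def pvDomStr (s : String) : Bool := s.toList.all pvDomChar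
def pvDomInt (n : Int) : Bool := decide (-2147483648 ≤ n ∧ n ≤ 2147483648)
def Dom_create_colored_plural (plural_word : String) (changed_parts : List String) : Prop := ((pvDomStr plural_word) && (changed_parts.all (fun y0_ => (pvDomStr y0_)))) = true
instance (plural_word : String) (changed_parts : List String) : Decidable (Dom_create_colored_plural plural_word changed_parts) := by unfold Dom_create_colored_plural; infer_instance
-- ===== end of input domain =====

-- B replaces A's per-character scan (testing every part at every position) by repeated
-- str.find jumps to the next match and slice copies of the unmatched chunks (objective: alternative).

-- ===== PORT A =====
-- the literal '<span style=""color: rgb(255, 140, 0);"">' + part + '</span>' (both Pythons use this literal)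
def pvSpan (p : List Char) : List Char :=
  "<span style=\"\"color: rgb(255, 140, 0);\"\">".toList ++ p ++ "</span>".toList

-- the while loop of A: state (i, result); fuel bounds the number of loop iterations
-- (the Python loop runs forever when an empty part is hit — excluded by Pre_ below)
def pvALoop (w : List Char) (parts : List (List Char)) : Nat → Nat → List Char → List Char
  | 0, _, res => res
  | fuel+1, i, res =>
    if h : i < w.length then
      match parts.find? (fun p => PySem.Chars.slice w (some (i:Int)) (some ((i:Int) + (p.length:Int))) == p) with
      | some p => pvALoop w parts fuel (i + p.length) (res ++ pvSpan p)
      | none => pvALoop w parts fuel (i+1) (res ++ [w[i]])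
    else res

def create_colored_plural (plural_word : String) (changed_parts : List String) : String :=
  if changed_parts.isEmpty then plural_word
  else String.ofList (pvALoop plural_word.toList (changed_parts.map String.toList) plural_word.toList.length 0 [])

-- ===== PORT B =====
-- the inner for loop of B: best = first (j, part) with minimal j = plural_word.find(part, pos) != -1
def pvBBest (w : List Char) (parts : List (List Char)) (pos : Nat) : Option (Int × List Char) :=
  parts.foldl (fun best p =>
    let j := PySem.Chars.findFrom w p (pos : Int) none
    if j != -1 && (match best with | none => true | some b => decide (j < b.1)) then some (j, p) else best) none

-- the while loop of B: state (pos, out = list of chunks, joined at the end)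
def pvBLoop (w : List Char) (parts : List (List Char)) : Nat → Nat → List (List Char) → List (List Char)
  | 0, _, out => out
  | fuel+1, pos, out =>
    if pos < w.length then
      match pvBBest w parts pos with
      | none => out ++ [PySem.Chars.slice w (some (pos:Int)) none]
      | some (j, p) =>
          pvBLoop w parts fuel (j.toNat + p.length)
            (out ++ [PySem.Chars.slice w (some (pos:Int)) (some j), pvSpan p])
    else out

def create_colored_plural_alt (plural_word : String) (changed_parts : List String) : String :=
  String.ofList (PySem.Chars.join [] (pvBLoop plural_word.toList (changed_parts.map String.toList) plural_word.toList.length 0 []))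

-- ===== PRECONDITION & SPEC =====
-- Pre_ excludes changed_parts containing the empty string: an empty part advances the position
-- by zero, so A's while loop (and B's) runs forever on any word position not already covered by
-- an earlier matching part; on the remaining such inputs both programs return the same value.
def Pre_create_colored_plural (plural_word : String) (changed_parts : List String) : Prop :=
  "" ∉ changed_parts
instance (plural_word : String) (changed_parts : List String) : Decidable (Pre_create_colored_plural plural_word changed_parts) := by unfold Pre_create_colored_plural; infer_instance

def pvWitness_create_colored_plural : String × List String := ("Baeume", ["ae", "e"])

def Spec_create_colored_plural (plural_word : String) (changed_parts : List String) (out : String) : Prop := out = create_colored_plural_alt plural_word changed_parts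
instance (plural_word : String) (changed_parts : List String) (out : String) : Decidable (Spec_create_colored_plural plural_word changed_parts out) := by unfold Spec_create_colored_plural; infer_instance

-- ===== CLAIM (what is proved, stated in full; the proofs are below) =====
def Claim_equal_create_colored_plural : Prop := ∀ (plural_word : String) (changed_parts : List String), Dom_create_colored_plural plural_word changed_parts → Pre_create_colored_plural plural_word changed_parts → Spec_create_colored_plural plural_word changed_parts (create_colored_plural plural_word changed_parts)

-- ===== LEMMAS AND PROOFS =====

-- Chars.join with an empty separator is flatten
lemma pvJoin_flatten (l : List (List Char)) : PySem.Chars.join [] l = l.flatten := by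
  induction l with
  | nil => rfl
  | cons a t IH =>
    cases t with
    | nil => simp [PySem.Chars.join_singleton]
    | cons b t2 => simp [PySem.Chars.join_cons_cons, IH]

-- A's slice test at position i answers "p is a prefix of w.drop i"
lemma pvA_test_iff (w p : List Char) (i : Nat) :
    (PySem.Chars.slice w (some (i:Int)) (some ((i:Int) + (p.length:Int))) == p) = true ↔ p <+: w.drop i := by
  simp only [PySem.Chars.slice_eq_listSlice, PySem.List.slice_natCast_add, beq_iff_eq]
  constructor
  · intro h; exact h ▸ List.take_prefix _ _
  · intro h; exact (List.prefix_iff_eq_take.mp h).symm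

-- B's slice w[pos:j] for 0 ≤ j
lemma pvB_slice_eq (w : List Char) (pos : Nat) (j : Int) (h0 : 0 ≤ j) :
    PySem.Chars.slice w (some (pos:Int)) (some j) = (w.drop pos).take (j.toNat - pos) := by
  rw [PySem.Chars.slice_eq_listSlice, (Int.toNat_of_nonneg h0).symm, PySem.List.slice_natCast]
  simp
  omega

-- a prefix at a later position k ≥ pos is an infix of w.drop pos
lemma pvInfix_of_prefix_drop (w q : List Char) (pos k : Nat) (hpk : pos ≤ k)
    (h : q <+: w.drop k) : q <:+: w.drop pos := by
  have hdd : w.drop k = (w.drop pos).drop (k - pos) := by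
    rw [List.drop_drop]; congr 1; omega
  rw [hdd] at h
  exact h.isInfix.trans (List.drop_suffix _ _).isInfix

-- if q's find from pos is -1, q matches nowhere at or after pos
lemma pvNoMatch_of_neg (w q : List Char) (pos k : Nat) (hk : pos ≤ w.length) (hpk : pos ≤ k)
    (h : PySem.Chars.findFrom w q (pos:Int) none = -1) : ¬ q <+: w.drop k := by
  intro hm
  exact (PySem.Chars.findFrom_natCast_eq_neg_one_iff w q pos hk).mp h
    (pvInfix_of_prefix_drop w q pos k hpk hm)

-- if q matches at k ≥ pos then q's find from pos is ≠ -1 and at most k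
lemma pvFind_le_of_match (w q : List Char) (pos k : Nat) (hk : pos ≤ w.length) (hpk : pos ≤ k)
    (hm : q <+: w.drop k) :
    PySem.Chars.findFrom w q (pos:Int) none ≠ -1 ∧
    (PySem.Chars.findFrom w q (pos:Int) none).toNat ≤ k := by
  have hne : PySem.Chars.findFrom w q (pos:Int) none ≠ -1 := by
    intro h; exact pvNoMatch_of_neg w q pos k hk hpk h hm
  refine ⟨hne, ?_⟩
  by_contra hgt
  exact (PySem.Chars.findFrom_natCast_spec w q pos hk hne).2.2 k hpk (by omega) hm

-- find? on a split list whose left part all fails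
lemma pvFind?_concat {alpha : Type} (f : alpha → Bool) (l1 l2 : List alpha) (p : alpha)
    (h1 : ∀ q ∈ l1, f q = false) (hp : f p = true) :
    (l1 ++ p :: l2).find? f = some p := by
  induction l1 with
  | nil =>
    simp only [List.nil_append]
    exact List.find?_cons_of_pos hp
  | cons a t IH =>
    rw [List.cons_append, List.find?_cons_of_neg (by simp [h1 a List.mem_cons_self])]
    exact IH (fun q hq => h1 q (List.mem_cons_of_mem a hq))

-- the body of B's inner for loop, abstracted over the find function
def pvStep (F : List Char → Int) (best : Option (Int × List Char)) (p : List Char) :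
    Option (Int × List Char) :=
  if F p != -1 && (match best with | none => true | some b => decide (F p < b.1)) then some (F p, p) else best

lemma pvBBest_eq (w : List Char) (parts : List (List Char)) (pos : Nat) :
    pvBBest w parts pos
      = parts.foldl (pvStep (fun p => PySem.Chars.findFrom w p (pos:Int) none)) none := rfl

lemma pvStep_some_eq (F : List Char → Int) (x : Int × List Char) (a : List Char) :
    pvStep F (some x) a = some (F a, a) ∨ pvStep F (some x) a = some x := by
  unfold pvStep
  split <;> (try split) <;> first | exact Or.inl rfl | exact Or.inr rfl

lemma pvFold_some_ne_none (F : List Char → Int) :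
    ∀ (l : List (List Char)) (x : Int × List Char), l.foldl (pvStep F) (some x) ≠ none := by
  intro l
  induction l with
  | nil => intro x h; simp at h
  | cons a t IH =>
    intro x
    simp only [List.foldl_cons]
    rcases pvStep_some_eq F x a with h | h
    · rw [h]; exact IH _
    · rw [h]; exact IH _

lemma pvFold_none (F : List Char → Int) :
    ∀ (l : List (List Char)), l.foldl (pvStep F) none = none → ∀ q ∈ l, F q = -1 := by
  intro l
  induction l with
  | nil => intro _ q hq; exact absurd hq (by simp)
  | cons a t IH =>
    intro h q hq
    simp only [List.foldl_cons] at h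
    by_cases ha : F a = -1
    · have hstep : pvStep F none a = none := by
        unfold pvStep; simp [ha]
      rw [hstep] at h
      rcases List.mem_cons.mp hq with rfl | hq'
      · exact ha
      · exact IH h q hq'
    · have hstep : pvStep F none a = some (F a, a) := by
        unfold pvStep; simp [bne_iff_ne, ha]
      rw [hstep] at h
      exact absurd h (pvFold_some_ne_none F t _)

lemma pvFold_some (F : List Char → Int) :
    ∀ (l : List (List Char)) (b : Int) (pb : List Char), F pb = b → b ≠ -1 →
    ∀ (j : Int) (p : List Char), l.foldl (pvStep F) (some (b, pb)) = some (j, p) →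
    F p = j ∧ j ≠ -1 ∧ j ≤ b ∧
    ((p = pb ∧ j = b ∧ ∀ q ∈ l, F q = -1 ∨ b ≤ F q) ∨
     (j < b ∧ ∃ l1 l2, l = l1 ++ p :: l2 ∧
        (∀ q ∈ l1, F q = -1 ∨ j < F q) ∧ (∀ q ∈ l2, F q = -1 ∨ j ≤ F q))) := by
  intro l
  induction l with
  | nil =>
    intro b pb hb hbne j p h
    simp only [List.foldl_nil, Option.some.injEq, Prod.mk.injEq] at h
    obtain ⟨rfl, rfl⟩ := h
    exact ⟨hb, hbne, le_refl _, Or.inl ⟨rfl, rfl, (by intro q hq; exact absurd hq (by simp))⟩⟩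
  | cons a t IH =>
    intro b pb hb hbne j p h
    simp only [List.foldl_cons] at h
    by_cases hc : F a ≠ -1 ∧ F a < b
    · have hstep : pvStep F (some (b, pb)) a = some (F a, a) := by
        unfold pvStep; simp [bne_iff_ne, hc.1, hc.2]
      rw [hstep] at h
      obtain ⟨hFp, hjne, hjb, hcase⟩ := IH (F a) a rfl hc.1 j p h
      refine ⟨hFp, hjne, le_of_lt (lt_of_le_of_lt hjb hc.2), Or.inr ?_⟩
      rcases hcase with ⟨rfl, rfl, hall⟩ | ⟨hjlt, l1, l2, rfl, hl1, hl2⟩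
      · exact ⟨hc.2, [], t, rfl, ((by intro q hq; exact absurd hq (by simp))), hall⟩
      · refine ⟨hjlt.trans hc.2, a :: l1, l2, rfl, ?_, hl2⟩
        intro q hq
        rcases List.mem_cons.mp hq with rfl | hq'
        · exact Or.inr hjlt
        · exact hl1 q hq'
    · have hnc : F a = -1 ∨ b ≤ F a := by
        by_cases h1 : F a = -1
        · exact Or.inl h1
        · exact Or.inr (not_lt.mp (fun hl => hc ⟨h1, hl⟩))
      have hstep : pvStep F (some (b, pb)) a = some (b, pb) := by
        unfold pvStep
        rcases hnc with h1 | h1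
        · simp [h1]
        · by_cases h2 : F a = -1
          · simp [h2]
          · simp [not_lt.mpr h1]
      rw [hstep] at h
      obtain ⟨hFp, hjne, hjb, hcase⟩ := IH b pb hb hbne j p h
      refine ⟨hFp, hjne, hjb, ?_⟩
      rcases hcase with ⟨rfl, hjb2, hall⟩ | ⟨hjlt, l1, l2, rfl, hl1, hl2⟩
      · refine Or.inl ⟨rfl, hjb2, ?_⟩
        intro q hq
        rcases List.mem_cons.mp hq with rfl | hq'
        · exact hnc
        · exact hall q hq'
      · refine Or.inr ⟨hjlt, a :: l1, l2, rfl, ?_, hl2⟩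
        intro q hq
        rcases List.mem_cons.mp hq with rfl | hq'
        · rcases hnc with h1 | h1
          · exact Or.inl h1
          · exact Or.inr (lt_of_lt_of_le hjlt h1)
        · exact hl1 q hq'

lemma pvFold_from_none (F : List Char → Int) :
    ∀ (l : List (List Char)) (j : Int) (p : List Char),
    l.foldl (pvStep F) none = some (j, p) →
    F p = j ∧ j ≠ -1 ∧ ∃ l1 l2, l = l1 ++ p :: l2 ∧
      (∀ q ∈ l1, F q = -1 ∨ j < F q) ∧ (∀ q ∈ l2, F q = -1 ∨ j ≤ F q) := by
  intro l
  induction l with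
  | nil => intro j p h; exact absurd h (by simp)
  | cons a t IH =>
    intro j p h
    simp only [List.foldl_cons] at h
    by_cases ha : F a = -1
    · have hstep : pvStep F none a = none := by unfold pvStep; simp [ha]
      rw [hstep] at h
      obtain ⟨hFp, hjne, l1, l2, rfl, hl1, hl2⟩ := IH j p h
      refine ⟨hFp, hjne, a :: l1, l2, rfl, ?_, hl2⟩
      intro q hq
      rcases List.mem_cons.mp hq with rfl | hq'
      · exact Or.inl ha
      · exact hl1 q hq'
    · have hstep : pvStep F none a = some (F a, a) := by
        unfold pvStep; simp [bne_iff_ne, ha]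
      rw [hstep] at h
      obtain ⟨hFp, hjne, hjb, hcase⟩ := pvFold_some F t (F a) a rfl ha j p h
      rcases hcase with ⟨rfl, hje, hall⟩ | ⟨hjlt, l1, l2, rfl, hl1, hl2⟩
      · refine ⟨hFp, hjne, [], t, by simp, ?_, ?_⟩
        · intro q hq; exact absurd hq (by simp)
        · intro q hq; exact (hall q hq).imp id (fun h' => hje ▸ h')
      · refine ⟨hFp, hjne, a :: l1, l2, rfl, ?_, hl2⟩
        intro q hq
        rcases List.mem_cons.mp hq with rfl | hq'
        · exact Or.inr hjlt
        · exact hl1 q hq'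

-- accumulator extraction for A's loop
lemma pvALoop_acc (w : List Char) (parts : List (List Char)) :
    ∀ (fuel i : Nat) (res : List Char),
    pvALoop w parts fuel i res = res ++ pvALoop w parts fuel i [] := by
  intro fuel
  induction fuel with
  | zero => intro i res; simp [pvALoop]
  | succ f IH =>
    intro i res
    by_cases h : i < w.length
    · simp only [pvALoop, dif_pos h]
      cases hf : parts.find? (fun p => PySem.Chars.slice w (some (i:Int)) (some ((i:Int) + (p.length:Int))) == p) with
      | some p =>
        try dsimp only
        rw [IH (i + p.length) (res ++ pvSpan p), IH (i + p.length) ([] ++ pvSpan p)]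
        simp
      | none =>
        try dsimp only
        rw [IH (i+1) (res ++ [w[i]'h]), IH (i+1) ([] ++ [w[i]'h])]
        simp
    · simp [pvALoop, dif_neg h]

-- fuel irrelevance for A's loop ([] ∉ parts keeps every step strictly increasing)
lemma pvALoop_fuel (w : List Char) (parts : List (List Char)) (hne : [] ∉ parts) :
    ∀ (fa : Nat) (i : Nat) (fb : Nat), w.length - i ≤ fa → w.length - i ≤ fb →
    ∀ res, pvALoop w parts fa i res = pvALoop w parts fb i res := by
  intro fa
  induction fa with
  | zero =>
    intro i fb hfa hfb res
    have hige : w.length ≤ i := by omega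
    cases fb with
    | zero => rfl
    | succ f => simp [pvALoop, dif_neg (by omega : ¬ i < w.length)]
  | succ f IH =>
    intro i fb hfa hfb res
    by_cases h : i < w.length
    · obtain ⟨fb', rfl⟩ : ∃ k, fb = k + 1 := ⟨fb - 1, by omega⟩
      simp only [pvALoop, dif_pos h]
      cases hf : parts.find? (fun p => PySem.Chars.slice w (some (i:Int)) (some ((i:Int) + (p.length:Int))) == p) with
      | some p =>
        try dsimp only
        have hpmem : p ∈ parts := List.mem_of_find?_eq_some hf
        have hplen : 1 ≤ p.length := List.length_pos_of_ne_nil (fun hp => hne (hp ▸ hpmem))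
        exact IH (i + p.length) fb' (by omega) (by omega) _
      | none =>
        try dsimp only
        exact IH (i+1) fb' (by omega) (by omega) _
    · cases fb with
      | zero => simp [pvALoop, dif_neg h]
      | succ f' => simp [pvALoop, dif_neg h]

-- A copies an unmatched region [i, i+d) one character at a time
lemma pvALoop_skip (w : List Char) (parts : List (List Char)) :
    ∀ (d i : Nat) (res : List Char), i + d ≤ w.length →
    (∀ k, i ≤ k → k < i + d → ∀ q ∈ parts, ¬ q <+: w.drop k) →
    pvALoop w parts (w.length - i) i res
      = pvALoop w parts (w.length - (i + d)) (i + d) (res ++ ((w.drop i).take d)) := by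
  intro d
  induction d with
  | zero => intro i res _ _; simp
  | succ d IH =>
    intro i res hle hnom
    have h : i < w.length := by omega
    have hfnone : parts.find? (fun p => PySem.Chars.slice w (some (i:Int)) (some ((i:Int) + (p.length:Int))) == p) = none := by
      apply List.find?_eq_none.mpr
      intro q hq hqt
      exact hnom i (le_refl i) (by omega) q hq ((pvA_test_iff w q i).mp hqt)
    have hsucc : w.length - i = (w.length - (i+1)) + 1 := by omega
    rw [hsucc]
    simp only [pvALoop, dif_pos h, hfnone]
    try dsimp only
    have harr : i + 1 + d = i + (d+1) := by omega
    have hres : (res ++ [w[i]'h]) ++ (w.drop (i+1)).take d = res ++ (w.drop i).take (d+1) := by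
      have h1 : (w.drop i).take (d+1) = w[i]'h :: (w.drop (i+1)).take d := by
        rw [List.drop_eq_getElem_cons h, List.take_succ_cons]
      rw [h1, List.append_assoc]
      rfl
    have hstep := IH (i+1) (res ++ [w[i]'h]) (by omega)
      (fun k hk1 hk2 q hq => hnom k (by omega) (by omega) q hq)
    rw [hstep, harr, hres]

-- main loop correspondence: B's joined chunks = A's result, from any position
lemma pvMain (w : List Char) (parts : List (List Char)) (hne : [] ∉ parts) :
    ∀ (n pos : Nat), w.length - pos = n → pos ≤ w.length →
    ∀ (fa fb : Nat), w.length - pos ≤ fa → w.length - pos ≤ fb →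
    ∀ (out : List (List Char)),
    PySem.Chars.join [] (pvBLoop w parts fb pos out)
      = PySem.Chars.join [] out ++ pvALoop w parts fa pos [] := by
  intro n
  induction n using Nat.strong_induction_on with
  | _ n IH =>
    intro pos hn hpos fa fb hfa hfb out
    by_cases hlt : pos < w.length
    · obtain ⟨fa', rfl⟩ : ∃ k, fa = k + 1 := ⟨fa - 1, by omega⟩
      obtain ⟨fb', rfl⟩ : ∃ k, fb = k + 1 := ⟨fb - 1, by omega⟩
      simp only [pvBLoop, if_pos hlt]
      cases hbb : pvBBest w parts pos with
      | none =>
        have hfneg : ∀ q ∈ parts, PySem.Chars.findFrom w q (pos:Int) none = -1 :=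
          pvFold_none _ parts (by rw [← pvBBest_eq w parts pos]; exact hbb)
        have hnom : ∀ k, pos ≤ k → ∀ q ∈ parts, ¬ q <+: w.drop k := by
          intro k hk q hq
          exact pvNoMatch_of_neg w q pos k (le_of_lt hlt) hk (hfneg q hq)
        have hA : pvALoop w parts (fa'+1) pos [] = w.drop pos := by
          rw [pvALoop_fuel w parts hne (fa'+1) pos (w.length - pos) hfa (le_refl _)]
          have := pvALoop_skip w parts (w.length - pos) pos [] (by omega)
            (fun k hk1 _ q hq => hnom k hk1 q hq)
          rw [this]
          have h1 : pos + (w.length - pos) = w.length := by omega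
          rw [h1]
          have h2 : w.length - w.length = 0 := by omega
          rw [h2]
          simp only [pvALoop, List.nil_append]
          have h3 : (w.drop pos).take (w.length - pos) = w.drop pos := by
            have : w.length - pos = (w.drop pos).length := by simp
            rw [this, List.take_length]
          exact h3
        rw [hA]
        have hslice : PySem.Chars.slice w (some ((pos:Nat):Int)) none = w.drop pos := by
          rw [PySem.Chars.slice_eq_listSlice, PySem.List.slice_from_natCast]
        rw [hslice]
        simp [pvJoin_flatten]
      | some jp =>
        obtain ⟨j, p⟩ := jp
        obtain ⟨hFp, hjne, l1, l2, hsplit, hl1, hl2⟩ :=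
          pvFold_from_none _ parts j p (by rw [← pvBBest_eq w parts pos]; exact hbb)
        have hpmem : p ∈ parts := by rw [hsplit]; exact List.mem_append_right _ List.mem_cons_self
        have hpne : p ≠ [] := fun hp => hne (hp ▸ hpmem)
        have hplen : 1 ≤ p.length := List.length_pos_of_ne_nil hpne
        have hspec := PySem.Chars.findFrom_natCast_spec w p pos (le_of_lt hlt) (by rw [hFp]; exact hjne)
        rw [hFp] at hspec
        have hjpos : (pos:Int) ≤ j := hspec.1
        have hj0 : (0:Int) ≤ j := le_trans (Int.natCast_nonneg pos) hjpos
        have hjtn : ((j.toNat:Nat):Int) = j := Int.toNat_of_nonneg hj0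
        have hposjn : pos ≤ j.toNat := by omega
        have hpref : p <+: w.drop j.toNat := hspec.2.1
        have hlen_le : p.length ≤ w.length - j.toNat := by
          have := hpref.length_le
          simpa using this
        have hjn_len : j.toNat + p.length ≤ w.length := by omega
        have hjn_lt : j.toNat < w.length := by omega
        -- no part matches strictly before j.toNat
        have hall : ∀ q ∈ parts, PySem.Chars.findFrom w q (pos:Int) none = -1 ∨
            j ≤ PySem.Chars.findFrom w q (pos:Int) none := by
          intro q hq
          rw [hsplit] at hq
          rcases List.mem_append.mp hq with hq' | hq'
          · exact (hl1 q hq').imp id le_of_lt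
          · rcases List.mem_cons.mp hq' with rfl | hq''
            · exact Or.inr (le_of_eq hFp.symm)
            · exact hl2 q hq''
        have hnom : ∀ k, pos ≤ k → k < j.toNat → ∀ q ∈ parts, ¬ q <+: w.drop k := by
          intro k hk1 hk2 q hq hm
          obtain ⟨hqne, hqle⟩ := pvFind_le_of_match w q pos k (le_of_lt hlt) hk1 hm
          rcases hall q hq with h1 | h1
          · exact hqne h1
          · have : j.toNat ≤ (PySem.Chars.findFrom w q (pos:Int) none).toNat := by
              have h2 : (0:Int) ≤ PySem.Chars.findFrom w q (pos:Int) none := le_trans hj0 h1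
              omega
            omega
        -- A's find? at j.toNat picks exactly p
        have hfind : parts.find? (fun q => PySem.Chars.slice w (some ((j.toNat:Nat):Int)) (some (((j.toNat:Nat):Int) + (q.length:Int))) == q) = some p := by
          rw [hsplit]
          apply pvFind?_concat
          · intro q hq
            by_contra hqt
            have hqt' : (PySem.Chars.slice w (some ((j.toNat:Nat):Int)) (some (((j.toNat:Nat):Int) + (q.length:Int))) == q) = true := by
              revert hqt; cases (PySem.Chars.slice w (some ((j.toNat:Nat):Int)) (some (((j.toNat:Nat):Int) + (q.length:Int))) == q) <;> simp
            have hqm : q <+: w.drop j.toNat := (pvA_test_iff w q j.toNat).mp hqt'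
            obtain ⟨hqne, hqle⟩ := pvFind_le_of_match w q pos j.toNat (le_of_lt hlt) hposjn hqm
            rcases hl1 q hq with h1 | h1
            · exact hqne h1
            · have h2 : (0:Int) ≤ PySem.Chars.findFrom w q (pos:Int) none := le_trans hj0 (le_of_lt h1)
              omega
          · exact (pvA_test_iff w p j.toNat).mpr hpref
        -- A's loop: skip to j.toNat, consume p, continue
        have hA : pvALoop w parts (fa'+1) pos []
            = ((w.drop pos).take (j.toNat - pos)) ++ pvSpan p
              ++ pvALoop w parts (w.length - (j.toNat + p.length)) (j.toNat + p.length) [] := by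
          rw [pvALoop_fuel w parts hne (fa'+1) pos (w.length - pos) hfa (le_refl _)]
          have hskip := pvALoop_skip w parts (j.toNat - pos) pos [] (by omega)
            (fun k hk1 hk2 q hq => hnom k hk1 (by omega) q hq)
          have harr : pos + (j.toNat - pos) = j.toNat := by omega
          rw [harr] at hskip
          rw [hskip]
          have hsucc : w.length - j.toNat = (w.length - j.toNat - 1) + 1 := by omega
          rw [hsucc]
          simp only [pvALoop, dif_pos hjn_lt, hfind, List.nil_append]
          rw [pvALoop_acc]
          rw [pvALoop_fuel w parts hne (w.length - j.toNat - 1) (j.toNat + p.length)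
              (w.length - (j.toNat + p.length)) (by omega) (le_refl _)]
          try rw [List.append_assoc]
        rw [hA]
        -- B's loop: one step then induction hypothesis
        have hB := IH (w.length - (j.toNat + p.length)) (by omega) (j.toNat + p.length) rfl (by omega)
          (w.length - (j.toNat + p.length)) fb' (le_refl _) (by omega)
          (out ++ [PySem.Chars.slice w (some ((pos:Nat):Int)) (some j), pvSpan p])
        rw [hB]
        have hslice : PySem.Chars.slice w (some ((pos:Nat):Int)) (some j)
            = (w.drop pos).take (j.toNat - pos) := pvB_slice_eq w pos j hj0
        rw [hslice]
        simp [pvJoin_flatten, List.append_assoc]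
    · have hpe : pos = w.length := by omega
      have hB : pvBLoop w parts fb pos out = out := by
        cases fb with
        | zero => rfl
        | succ f => simp [pvBLoop, if_neg hlt]
      have hA : pvALoop w parts fa pos [] = [] := by
        cases fa with
        | zero => rfl
        | succ f => simp [pvALoop, dif_neg hlt]
      rw [hB, hA]
      simp

-- ===== VERDICT (by name: the statement is the Claim_ definition above) =====
theorem create_colored_plural_spec : Claim_equal_create_colored_plural := by
  unfold Claim_equal_create_colored_plural
  intro w parts _ hpre
  unfold Spec_create_colored_plural create_colored_plural create_colored_plural_alt
  cases parts with
  | nil =>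
    simp only [List.isEmpty_nil, if_true, List.map_nil]
    have hBL : PySem.Chars.join [] (pvBLoop w.toList [] w.toList.length 0 []) = w.toList := by
      cases hw : w.toList.length with
      | zero =>
        have hwl : w.toList = [] := List.length_eq_zero_iff.mp hw
        rw [hwl]
        rfl
      | succ m =>
        simp only [pvBLoop]
        rw [if_pos (by omega : 0 < w.toList.length)]
        have hbb : pvBBest w.toList [] 0 = none := rfl
        rw [hbb]
        have hsl : PySem.Chars.slice w.toList (some ((0:Nat):Int)) none = w.toList := by
          rw [PySem.Chars.slice_eq_listSlice, PySem.List.slice_from_natCast]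
          simp
        rw [hsl]
        rw [pvJoin_flatten]
        simp
    rw [hBL]
    simp
  | cons s t =>
    have hne : [] ∉ (s :: t).map String.toList := by
      intro hmem
      obtain ⟨x, hx, hxe⟩ := List.mem_map.mp hmem
      have hxs : x = "" := by
        have := congrArg String.ofList hxe
        simpa using this
      exact hpre (hxs ▸ hx)
    simp only [List.isEmpty_cons, Bool.false_eq_true, if_false]
    have hM := pvMain w.toList ((s :: t).map String.toList) hne (w.toList.length) 0
      (by omega) (Nat.zero_le _) (w.toList.length) (w.toList.length) (by omega) (by omega) []
    have hj : PySem.Chars.join [] ([] : List (List Char)) = [] := rfl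
    rw [hj, List.nil_append] at hM
    exact congrArg String.ofList hM.symm
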